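-- pv_equiv track=rewrite | github.com/Seatry/Explorer | explorer_from_dirty_to_clean.py | gramming
-- ===== SOURCE A (Python) =====
-- keyWords = ["федеральный округ", "городской округ", "республика", "респ", "район",
--                                 "р-н", "жилой массив", "садовое товарищество", "область", "россия"]
--
-- def deleteKeyWords(s) :
--     for key in keyWords :
--         s = s.replace(key, '')
--     s = s.replace("большая", "б.")
--     return s
--
-- class Symbol:
--     LETTER = 0,
--     NUMBER = 1,
--     DELIMITER = 2
--
-- def correctMeaning(meaning, correct, ind) :
--     if meaning != correct :
--         meaning = correct
--         ind = 0
--     return ind, meaning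
--
-- def makeGramm(s, i, trigramms, ind):
--     trigramms.add(s[i-ind:i+1])
--     if ind < 2 :
--         ind += 1
--     return ind
--
-- def gramming(s) :
--     meaning = Symbol.LETTER
--     ind = 0
--     trigramms = set()
--     #for i, c in enumerate(s):
--         #if c.isalpha():
--            # s = s[i:len(s)]
--            # break
--     s = s.lower()
--     s = deleteKeyWords(s)
--     for i, c in enumerate(s) :
--         if c.isalpha() :
--             ind, meaning = correctMeaning(meaning, Symbol.LETTER, ind)
--             ind = makeGramm(s, i, trigramms, ind)
--         elif c.isdigit() :
--             ind, meaning = correctMeaning(meaning, Symbol.NUMBER, ind)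
--             ind = makeGramm(s, i, trigramms, ind)
--         elif (c != '|') :
--             meaning = Symbol.DELIMITER;
--         else:
--             break
--     return trigramms
-- ===== SOURCE B (Python) =====
-- keyWords = ["федеральный округ", "городской округ", "республика", "респ", "район",
--                                 "р-н", "жилой массив", "садовое товарищество", "область", "россия"]
--
-- def deleteKeyWords(s):
--     for key in keyWords:
--         s = s.replace(key, '')
--     s = s.replace("большая", "б.")
--     return s
--
-- def gramming(s):
--     s = deleteKeyWords(s.lower())
--     # tokenize: maximal runs of same character class (alpha / digit); stop at '|'
--     tokens = []
--     cur = ""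
--     kind = None
--     for c in s:
--         if c == '|':
--             break
--         if c.isalpha():
--             k = 'a'
--         elif c.isdigit():
--             k = 'd'
--         else:
--             k = None
--         if k != kind:
--             if cur:
--                 tokens.append(cur)
--             cur = ""
--             kind = k
--         if k is not None:
--             cur += c
--     if cur:
--         tokens.append(cur)
--     # generate 1/2/3-length sliding suffixes of each token
--     trigramms = set()
--     for tok in tokens:
--         for j in range(len(tok)):
--             trigramms.add(tok[max(0, j - 2):j + 1])
--     return trigramms
-- ===== Notes on version B (the rewrite author's own statement) =====
-- stated objective: simpler
-- what changed: Replaces A's per-character meaning/ind state machine (with correctMeaning/makeGramm helpers and absolute-index slicing) by a two-phase pass: segment the cleaned string into maximal same-class runs (stopping at '|'), then emit the 1/2/3-length sliding suffixes of each run.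
import Mathlib
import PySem

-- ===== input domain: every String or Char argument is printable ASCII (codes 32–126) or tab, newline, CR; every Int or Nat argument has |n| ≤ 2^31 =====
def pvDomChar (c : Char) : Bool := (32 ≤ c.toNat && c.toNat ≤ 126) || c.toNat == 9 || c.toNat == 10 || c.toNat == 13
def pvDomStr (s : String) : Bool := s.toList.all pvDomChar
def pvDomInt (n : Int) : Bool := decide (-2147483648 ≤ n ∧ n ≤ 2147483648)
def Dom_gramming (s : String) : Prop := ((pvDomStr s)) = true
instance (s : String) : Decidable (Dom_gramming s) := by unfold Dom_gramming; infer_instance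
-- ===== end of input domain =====

-- B replaces A's meaning/ind state machine by a tokenize-then-generate pass
-- (split into maximal same-class runs, then emit the 1/2/3-length sliding
-- suffixes of each run); objective: simpler decomposition, same cost.

-- ===== PORT A =====
def keyWordsA : List String :=
  ["федеральный округ", "городской округ", "республика", "респ", "район",
   "р-н", "жилой массив", "садовое товарищество", "область", "россия"]

def deleteKeyWordsA (s : String) : String :=
  let s := keyWordsA.foldl (fun s key => PySem.Str.replace s key "") s
  PySem.Str.replace s "большая" "б."

inductive SymbolA
  | letter | number | delim
deriving DecidableEq, Repr

def correctMeaningA (meaning correct : SymbolA) (ind : Int) : Int × SymbolA :=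
  if meaning ≠ correct then (0, correct) else (ind, meaning)

-- trigramms.add(s[i-ind:i+1]); the Python mutates the set in place, the port
-- returns the updated set alongside the new ind
def makeGrammA (s : List Char) (i : Int) (trigramms : PySem.Set String) (ind : Int) :
    PySem.Set String × Int :=
  let trigramms :=
    PySem.Set.add trigramms (String.ofList (PySem.List.slice s (some (i - ind)) (some (i + 1))))
  (trigramms, if ind < 2 then ind + 1 else ind)

-- 'for i, c in enumerate(s)' with the 'break' at '|'
def grammingLoopA (s : List Char) (rest : List Char) (i : Int) (meaning : SymbolA)
    (ind : Int) (trigramms : PySem.Set String) : PySem.Set String :=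
  match rest with
  | [] => trigramms
  | c :: rest =>
    if PySem.Chars.isalpha c then
      let p := correctMeaningA meaning .letter ind
      let q := makeGrammA s i trigramms p.1
      grammingLoopA s rest (i + 1) p.2 q.2 q.1
    else if PySem.Chars.isdigit c then
      let p := correctMeaningA meaning .number ind
      let q := makeGrammA s i trigramms p.1
      grammingLoopA s rest (i + 1) p.2 q.2 q.1
    else if c ≠ '|' then
      grammingLoopA s rest (i + 1) .delim ind trigramms
    else trigramms

def gramming (s : String) : List String :=
  let t := deleteKeyWordsA (PySem.Str.lower s)
  grammingLoopA t.toList t.toList 0 .letter 0 PySem.Set.empty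

-- ===== PORT B =====
def keyWordsB : List String :=
  ["федеральный округ", "городской округ", "республика", "респ", "район",
   "р-н", "жилой массив", "садовое товарищество", "область", "россия"]

def deleteKeyWordsB (s : String) : String :=
  let s := keyWordsB.foldl (fun s key => PySem.Str.replace s key "") s
  PySem.Str.replace s "большая" "б."

-- maximal runs of same character class (alpha 'a' / digit 'd'); stop at '|'
def tokenizeB (cs : List Char) (cur : List Char) (kind : Option Char) : List (List Char) :=
  match cs with
  | [] => if cur ≠ [] then [cur] else []
  | c :: cs =>
    if c = '|' then (if cur ≠ [] then [cur] else [])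
    else
      let k : Option Char :=
        if PySem.Chars.isalpha c then some 'a'
        else if PySem.Chars.isdigit c then some 'd'
        else none
      if k ≠ kind then
        (if cur ≠ [] then [cur] else []) ++ tokenizeB cs (if k.isSome then [c] else []) k
      else
        tokenizeB cs (if k.isSome then cur ++ [c] else cur) kind

-- trigramms.add(tok[max(0, j-2):j+1]) for j in range(len(tok))
def tokenGramsB (trigramms : PySem.Set String) (tok : List Char) : PySem.Set String :=
  (PySem.List.pyRange 0 (tok.length : Int) 1).foldl
    (fun tri j =>
      PySem.Set.add tri (String.ofList (PySem.List.slice tok (some (max 0 (j - 2))) (some (j + 1)))))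
    trigramms

def gramming_alt (s : String) : List String :=
  let t := deleteKeyWordsB (PySem.Str.lower s)
  (tokenizeB t.toList [] none).foldl tokenGramsB PySem.Set.empty

-- ===== PRECONDITION & SPEC =====
def Spec_gramming (s : String) (out : List String) : Prop := out = gramming_alt s
instance (s : String) (out : List String) : Decidable (Spec_gramming s out) := by unfold Spec_gramming; infer_instance

-- ===== CLAIM (what is proved, stated in full; the proofs are below) =====
def Claim_equal_gramming : Prop := ∀ (s : String), Dom_gramming s → Spec_gramming s (gramming s)

-- ===== LEMMAS AND PROOFS =====

-- normal form of the sliding suffix tok[max(0, j-2):j+1]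
def gramNF (l : List Char) (j : Nat) : List Char :=
  (l.drop (j - min j 2)).take (min j 2 + 1)

theorem slice_gram (l : List Char) (j : Nat) :
    PySem.List.slice l (some (max 0 ((j : Int) - 2))) (some ((j : Int) + 1)) = gramNF l j := by
  rw [PySem.List.slice_toNat l (by omega) (by omega)]
  unfold gramNF
  have hb : ((j : Int) + 1).toNat - (max 0 ((j : Int) - 2)).toNat = min j 2 + 1 := by omega
  have ha : (max 0 ((j : Int) - 2)).toNat = j - min j 2 := by omega
  rw [hb, ha]

theorem gram_prefix (l t : List Char) (j : Nat) (h : j < l.length) :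
    gramNF (l ++ t) j = gramNF l j := by
  unfold gramNF
  rw [List.drop_append, List.take_append]
  have hl : (l.drop (j - min j 2)).length = l.length - (j - min j 2) := by simp
  have h0 : min j 2 + 1 - (l.drop (j - min j 2)).length = 0 := by omega
  rw [h0, List.take_zero, List.append_nil]

theorem gram_last (l : List Char) (c : Char) :
    gramNF (l ++ [c]) l.length = l.drop (l.length - min l.length 2) ++ [c] := by
  unfold gramNF
  rw [List.drop_append, List.take_append]
  have h1 : l.length - min l.length 2 - l.length = 0 := by omega
  have hl : (l.drop (l.length - min l.length 2)).length = min l.length 2 := by simp; omega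
  rw [h1, List.take_of_length_le (by omega), hl]
  have h2 : min l.length 2 + 1 - min l.length 2 = 1 := by omega
  rw [h2]
  rfl

theorem sliceA_nat (pre cur rest : List Char) (c : Char) (n : Nat) (h : n ≤ cur.length) :
    ((pre ++ cur ++ c :: rest).drop (pre.length + (cur.length - n))).take (n + 1)
      = cur.drop (cur.length - n) ++ [c] := by
  rw [List.append_assoc, List.drop_append, List.drop_eq_nil_of_le (by omega)]
  have h1 : pre.length + (cur.length - n) - pre.length = cur.length - n := by omega
  rw [List.nil_append, h1, List.drop_append]
  have h2 : cur.length - n - cur.length = 0 := by omega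
  rw [h2, List.drop_zero, List.take_append, List.take_of_length_le (by simp; omega)]
  have h3 : n + 1 - (cur.drop (cur.length - n)).length = 1 := by simp; omega
  rw [h3]
  rfl

-- A's slice s[i-ind : i+1] at position i = |pre| + |cur|, where the ind chars
-- before i are the tail of the current run cur
theorem sliceA (pre cur rest : List Char) (c : Char) (ind : Int)
    (h0 : 0 ≤ ind) (h : ind ≤ (cur.length : Int)) :
    PySem.List.slice (pre ++ cur ++ c :: rest)
        (some (((pre.length + cur.length : Nat) : Int) - ind))
        (some (((pre.length + cur.length : Nat) : Int) + 1))
      = cur.drop (cur.length - ind.toNat) ++ [c] := by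
  rw [PySem.List.slice_toNat _ (by omega) (by omega)]
  have hb : (((pre.length + cur.length : Nat) : Int) + 1).toNat
      - (((pre.length + cur.length : Nat) : Int) - ind).toNat = ind.toNat + 1 := by omega
  have ha : (((pre.length + cur.length : Nat) : Int) - ind).toNat
      = pre.length + (cur.length - ind.toNat) := by omega
  rw [hb, ha]
  exact sliceA_nat pre cur rest c ind.toNat (by omega)

-- fold over range n adding grams, the list form of tokenGramsB
theorem tokenGramsB_eq (tri : PySem.Set String) (tok : List Char) :
    tokenGramsB tri tok
      = (List.range tok.length).foldl
          (fun tri j => PySem.Set.add tri (String.ofList (gramNF tok j))) tri := by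
  unfold tokenGramsB
  rw [PySem.List.pyRange_zero_nat, List.foldl_map]
  exact PySem.List.foldl_congr_mem _ _ _ _ (fun acc j _ => by rw [slice_gram])

theorem tokenGrams_nil (tri : PySem.Set String) : tokenGramsB tri [] = tri := rfl

theorem tokenGrams_one (tri : PySem.Set String) (c : Char) :
    tokenGramsB tri [c] = PySem.Set.add tri (String.ofList [c]) := by
  rw [tokenGramsB_eq]
  simp [gramNF]

theorem tokenGrams_snoc (tri : PySem.Set String) (cur : List Char) (c : Char) :
    tokenGramsB tri (cur ++ [c])
      = PySem.Set.add (tokenGramsB tri cur) (String.ofList (gramNF (cur ++ [c]) cur.length)) := by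
  rw [tokenGramsB_eq, tokenGramsB_eq]
  simp only [List.length_append, List.length_cons, List.length_nil, List.range_succ,
    List.foldl_append, List.foldl_cons, List.foldl_nil, Nat.zero_add]
  congr 1
  exact PySem.List.foldl_congr_mem _ _ _ _
    (fun acc j hj => by rw [gram_prefix cur [c] j (List.mem_range.mp hj)])

-- the loop invariant tying A's (meaning, ind) state to B's (cur, kind) state
def InvAB (cur : List Char) (kind : Option Char) (meaning : SymbolA) (ind : Int) : Prop :=
  (cur = [] ∧ kind = none ∧ (meaning = .delim ∨ (meaning = .letter ∧ ind = 0)))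
  ∨ (cur ≠ [] ∧ ((kind = some 'a' ∧ meaning = .letter) ∨ (kind = some 'd' ∧ meaning = .number))
      ∧ ind = min (cur.length : Int) 2)

-- A's running set is B's accumulated set plus the grams of the current run cur
theorem main_lemma (rest : List Char) : ∀ (pre cur : List Char) (kind : Option Char)
    (meaning : SymbolA) (ind : Int) (tri : PySem.Set String),
    InvAB cur kind meaning ind →
    grammingLoopA (pre ++ cur ++ rest) rest ((pre.length + cur.length : Nat) : Int) meaning ind
        (tokenGramsB tri cur)
      = (tokenizeB rest cur kind).foldl tokenGramsB tri := by
  induction rest with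
  | nil =>
    intro pre cur kind meaning ind tri hinv
    simp only [grammingLoopA, tokenizeB]
    by_cases hc : cur = []
    · simp [hc, tokenGrams_nil]
    · simp [hc]
  | cons c rest ih =>
    intro pre cur kind meaning ind tri hinv
    by_cases hq : c = '|'
    · subst hq
      have ha : PySem.Chars.isalpha '|' = false := by decide
      have hd : PySem.Chars.isdigit '|' = false := by decide
      simp only [grammingLoopA, tokenizeB, ha, hd]
      by_cases hc : cur = []
      · simp [hc, tokenGrams_nil]
      · simp [hc]
    · -- c is not '|'
      by_cases hA : PySem.Chars.isalpha c = true
      · -- letter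
        rcases hinv with ⟨hcur, hkind, hms⟩ | ⟨hcur, hkm, hind⟩
        · -- empty current run: start the letter run [c]
          subst hcur; subst hkind
          have hcm : correctMeaningA meaning SymbolA.letter ind = (0, SymbolA.letter) := by
            rcases hms with hm | ⟨hm, hi⟩ <;> subst hm <;> simp [correctMeaningA]
            subst hi; rfl
          have hslice := sliceA pre [] rest c 0 (by omega) (by simp)
          simp at hslice
          have step := ih pre [c] (some 'a') SymbolA.letter 1 tri
            (Or.inr ⟨by simp, Or.inl ⟨rfl, rfl⟩, by norm_num⟩)
          rw [tokenGrams_one] at step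
          simp [grammingLoopA, tokenizeB, hA, hq, hcm, makeGrammA, hslice, tokenGrams_nil]
          simpa using step
        · -- inside a run
          rcases hkm with ⟨hk, hm⟩ | ⟨hk, hm⟩
          · -- same class: extend the letter run with c
            subst hk; subst hm
            have hcm : correctMeaningA SymbolA.letter SymbolA.letter ind = (ind, SymbolA.letter) := by
              simp [correctMeaningA]
            have hslice := sliceA pre cur rest c ind (by omega) (by omega)
            have htn : ind.toNat = min cur.length 2 := by omega
            have hind' : (if ind < 2 then ind + 1 else ind) = min (((cur ++ [c]).length : Nat) : Int) 2 := by
              simp only [List.length_append, List.length_cons, List.length_nil]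
              push_cast
              omega
            have step := ih pre (cur ++ [c]) (some 'a') SymbolA.letter
              (if ind < 2 then ind + 1 else ind) tri
              (Or.inr ⟨by simp, Or.inl ⟨rfl, rfl⟩, hind'⟩)
            rw [tokenGrams_snoc] at step
            simp at hslice
            simp [grammingLoopA, tokenizeB, hA, hq, hcm, makeGrammA, hslice, htn, ← gram_last]
            simpa [List.append_assoc] using step
          · -- class change digit → letter: flush cur, start the run [c]
            subst hk; subst hm
            have hcm : correctMeaningA SymbolA.number SymbolA.letter ind = (0, SymbolA.letter) := by
              simp [correctMeaningA]
            have hslice := sliceA pre cur rest c 0 (by omega) (by omega)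
            simp at hslice
            have step := ih (pre ++ cur) [c] (some 'a') SymbolA.letter 1 (tokenGramsB tri cur)
              (Or.inr ⟨by simp, Or.inl ⟨rfl, rfl⟩, by norm_num⟩)
            rw [tokenGrams_one] at step
            simp [grammingLoopA, tokenizeB, hA, hq, hcm, makeGrammA, hslice, hcur]
            simpa [List.append_assoc] using step
      · by_cases hD : PySem.Chars.isdigit c = true
        · -- digit
          rcases hinv with ⟨hcur, hkind, hms⟩ | ⟨hcur, hkm, hind⟩
          · -- empty current run: start the digit run [c]
            subst hcur; subst hkind
            have hcm : correctMeaningA meaning SymbolA.number ind = (0, SymbolA.number) := by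
              rcases hms with hm | ⟨hm, hi⟩ <;> subst hm <;> simp [correctMeaningA]
            have hslice := sliceA pre [] rest c 0 (by omega) (by simp)
            simp at hslice
            have step := ih pre [c] (some 'd') SymbolA.number 1 tri
              (Or.inr ⟨by simp, Or.inr ⟨rfl, rfl⟩, by norm_num⟩)
            rw [tokenGrams_one] at step
            simp [grammingLoopA, tokenizeB, hA, hD, hq, hcm, makeGrammA, hslice, tokenGrams_nil]
            simpa using step
          · rcases hkm with ⟨hk, hm⟩ | ⟨hk, hm⟩
            · -- class change letter → digit: flush cur, start the run [c]
              subst hk; subst hm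
              have hcm : correctMeaningA SymbolA.letter SymbolA.number ind = (0, SymbolA.number) := by
                simp [correctMeaningA]
              have hslice := sliceA pre cur rest c 0 (by omega) (by omega)
              simp at hslice
              have step := ih (pre ++ cur) [c] (some 'd') SymbolA.number 1 (tokenGramsB tri cur)
                (Or.inr ⟨by simp, Or.inr ⟨rfl, rfl⟩, by norm_num⟩)
              rw [tokenGrams_one] at step
              simp [grammingLoopA, tokenizeB, hA, hD, hq, hcm, makeGrammA, hslice, hcur]
              simpa [List.append_assoc] using step
            · -- same class: extend the digit run with c
              subst hk; subst hm
              have hcm : correctMeaningA SymbolA.number SymbolA.number ind = (ind, SymbolA.number) := by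
                simp [correctMeaningA]
              have hslice := sliceA pre cur rest c ind (by omega) (by omega)
              have htn : ind.toNat = min cur.length 2 := by omega
              have hind' : (if ind < 2 then ind + 1 else ind) = min (((cur ++ [c]).length : Nat) : Int) 2 := by
                simp only [List.length_append, List.length_cons, List.length_nil]
                push_cast
                omega
              have step := ih pre (cur ++ [c]) (some 'd') SymbolA.number
                (if ind < 2 then ind + 1 else ind) tri
                (Or.inr ⟨by simp, Or.inr ⟨rfl, rfl⟩, hind'⟩)
              rw [tokenGrams_snoc] at step
              simp at hslice
              simp [grammingLoopA, tokenizeB, hA, hD, hq, hcm, makeGrammA, hslice, htn, ← gram_last]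
              simpa [List.append_assoc] using step
        · -- other delimiter character: end the current run
          rcases hinv with ⟨hcur, hkind, _⟩ | ⟨hcur, hkm, _⟩
          · -- no current run
            subst hcur; subst hkind
            have step := ih (pre ++ [c]) [] none SymbolA.delim ind tri
              (Or.inl ⟨rfl, rfl, Or.inl rfl⟩)
            simp [grammingLoopA, tokenizeB, hA, hD, hq, tokenGrams_nil]
            simpa [tokenGrams_nil] using step
          · -- flush the current run
            have hkind : kind ≠ none := by
              rcases hkm with ⟨hk, _⟩ | ⟨hk, _⟩ <;> subst hk <;> simp
            have step := ih (pre ++ cur ++ [c]) [] none SymbolA.delim ind (tokenGramsB tri cur)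
              (Or.inl ⟨rfl, rfl, Or.inl rfl⟩)
            simp [grammingLoopA, tokenizeB, hA, hD, hq, hcur, Ne.symm hkind]
            simpa [tokenGrams_nil, List.append_assoc, add_assoc] using step

-- ===== VERDICT (by name: the statement is the Claim_ definition above) =====
theorem gramming_spec : Claim_equal_gramming := by
  intro s _
  unfold Spec_gramming gramming gramming_alt
  have h := main_lemma (deleteKeyWordsB (PySem.Str.lower s)).toList [] [] none SymbolA.letter 0
    PySem.Set.empty (Or.inl ⟨rfl, rfl, Or.inr ⟨rfl, rfl⟩⟩)
  simpa [deleteKeyWordsA, deleteKeyWordsB, keyWordsA, keyWordsB, tokenGrams_nil] using h
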